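-- pv_equiv track=rewrite | github.com/OGsiji/data-contract-validator | retl_validator/extractors/dbt.py | _split_columns
-- ===== SOURCE A (Python) =====
-- from typing import Dict, List, Any, Optional
--
-- def _split_columns(select_clause: str) -> List[str]:
--     """Split SELECT columns by comma, handling nested functions"""
--
--     columns = []
--     current_column = ""
--     paren_depth = 0
--
--     for char in select_clause:
--         if char == "(":
--             paren_depth += 1
--         elif char == ")":
--             paren_depth -= 1
--         elif char == "," and paren_depth == 0:
--             if current_column.strip():
--                 columns.append(current_column.strip())
--             current_column = ""
--             continue
--
--         current_column += char
--
--     # Don't forget the last column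
--     if current_column.strip():
--         columns.append(current_column.strip())
--
--     return columns
-- ===== SOURCE B (Python) =====
-- from typing import List
--
--
-- def _split_columns(select_clause: str) -> List[str]:
--     """Split SELECT columns by comma, handling nested functions.
--
--     Two passes: first collect the indices of every comma at parenthesis
--     depth 0, then slice the clause at those boundaries, stripping each
--     piece and dropping empty ones.
--     """
--     cuts = []
--     depth = 0
--     for i, ch in enumerate(select_clause):
--         if ch == "(":
--             depth += 1
--         elif ch == ")":
--             depth -= 1
--         elif ch == "," and depth == 0:
--             cuts.append(i)
--
--     columns = []
--     start = 0
--     for cut in cuts + [len(select_clause)]: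
--         piece = select_clause[start:cut].strip()
--         if piece:
--             columns.append(piece)
--         start = cut + 1
--     return columns
-- ===== Notes on version B (the rewrite author's own statement) =====
-- stated objective: alternative
-- what changed: Instead of accumulating a growing current-column buffer while scanning, B first scans once to record the indices of all depth-0 commas, then slices the original string at those boundaries, stripping each slice and dropping empty ones.
import Mathlib
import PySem

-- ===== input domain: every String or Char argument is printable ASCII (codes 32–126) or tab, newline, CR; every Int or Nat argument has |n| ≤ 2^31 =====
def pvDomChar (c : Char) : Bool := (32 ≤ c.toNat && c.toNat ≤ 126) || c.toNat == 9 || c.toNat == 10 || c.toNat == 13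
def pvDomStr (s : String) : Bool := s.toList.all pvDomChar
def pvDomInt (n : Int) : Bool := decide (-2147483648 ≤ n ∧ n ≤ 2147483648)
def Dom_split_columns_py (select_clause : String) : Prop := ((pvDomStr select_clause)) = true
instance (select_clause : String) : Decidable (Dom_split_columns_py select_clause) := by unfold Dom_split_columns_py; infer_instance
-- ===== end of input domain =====

-- B replaces A's scan-and-accumulate-a-buffer loop by two passes: collect the
-- indices of the depth-0 commas, then slice the string at those boundaries
-- (objective: alternative decomposition, same asymptotic cost).

-- ===== PORT A =====
-- state: (columns, current_column, paren_depth)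
def pvAStep (st : List (List Char) × List Char × Int) (c : Char) :
    List (List Char) × List Char × Int :=
  if c = '(' then (st.1, st.2.1 ++ [c], st.2.2 + 1)
  else if c = ')' then (st.1, st.2.1 ++ [c], st.2.2 - 1)
  else if c = ',' ∧ st.2.2 = 0 then
    ((if PySem.Chars.strip st.2.1 ≠ [] then st.1 ++ [PySem.Chars.strip st.2.1] else st.1),
      [], st.2.2)
  else (st.1, st.2.1 ++ [c], st.2.2)

def split_columns_py (select_clause : String) : List String :=
  let r := select_clause.toList.foldl pvAStep ([], [], 0)
  let cols :=
    if PySem.Chars.strip r.2.1 ≠ [] then r.1 ++ [PySem.Chars.strip r.2.1] else r.1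
  cols.map String.ofList

-- ===== PORT B =====
-- pass 1: indices of commas at depth 0; state: (cuts, depth)
def pvCutStep (st : List Int × Int) (p : Int × Char) : List Int × Int :=
  if p.2 = '(' then (st.1, st.2 + 1)
  else if p.2 = ')' then (st.1, st.2 - 1)
  else if p.2 = ',' ∧ st.2 = 0 then (st.1 ++ [p.1], st.2)
  else (st.1, st.2)

-- pass 2: slice [start:cut], strip, keep nonempty; state: (columns, start)
def pvSliceStep (cs : List Char) (st : List (List Char) × Int) (cut : Int) :
    List (List Char) × Int :=
  let piece := PySem.Chars.strip (PySem.List.slice cs (some st.2) (some cut))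
  ((if piece ≠ [] then st.1 ++ [piece] else st.1), cut + 1)

def split_columns_py_alt (select_clause : String) : List String :=
  let cs := select_clause.toList
  let cuts := ((PySem.List.enumerate cs 0).foldl pvCutStep ([], 0)).1
  let r := (cuts ++ [(cs.length : Int)]).foldl (pvSliceStep cs) ([], 0)
  r.1.map String.ofList

-- ===== PRECONDITION & SPEC =====
def Spec_split_columns_py (select_clause : String) (out : List String) : Prop := out = split_columns_py_alt select_clause
instance (select_clause : String) (out : List String) : Decidable (Spec_split_columns_py select_clause out) := by unfold Spec_split_columns_py; infer_instance

-- ===== CLAIM (what is proved, stated in full; the proofs are below) =====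
def Claim_equal_split_columns_py : Prop := ∀ (select_clause : String), Dom_split_columns_py select_clause → Spec_split_columns_py select_clause (split_columns_py select_clause)

-- ===== LEMMAS AND PROOFS =====

-- Reference splitter: the raw segments of cs between depth-0 commas, `cur` the
-- characters already read of the current segment.
def pvSplitFrom : List Char → List Char → Int → List (List Char)
  | [], cur, _ => [cur]
  | c :: cs, cur, d =>
    if c = '(' then pvSplitFrom cs (cur ++ [c]) (d + 1)
    else if c = ')' then pvSplitFrom cs (cur ++ [c]) (d - 1)
    else if c = ',' ∧ d = 0 then cur :: pvSplitFrom cs [] d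
    else pvSplitFrom cs (cur ++ [c]) d

-- strip every segment, drop the blank ones
def pvPost (l : List (List Char)) : List (List Char) :=
  (l.map PySem.Chars.strip).filter (· ≠ [])

def pvDepthAfter : List Char → Int → Int
  | [], d => d
  | c :: cs, d =>
    if c = '(' then pvDepthAfter cs (d + 1)
    else if c = ')' then pvDepthAfter cs (d - 1)
    else pvDepthAfter cs d

-- cut positions of B's first pass, recursively
def pvCutsFrom : List Char → Nat → Int → List Nat
  | [], _, _ => []
  | c :: cs, i, d =>
    if c = '(' then pvCutsFrom cs (i + 1) (d + 1)
    else if c = ')' then pvCutsFrom cs (i + 1) (d - 1)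
    else if c = ',' ∧ d = 0 then i :: pvCutsFrom cs (i + 1) d
    else pvCutsFrom cs (i + 1) d

theorem pvPost_cons (a : List Char) (l : List (List Char)) :
    pvPost (a :: l) = (if PySem.Chars.strip a ≠ [] then [PySem.Chars.strip a] else []) ++ pvPost l := by
  simp only [pvPost, List.map_cons, List.filter_cons]
  split_ifs with h <;> simp_all

theorem pvPost_append (l1 l2 : List (List Char)) : pvPost (l1 ++ l2) = pvPost l1 ++ pvPost l2 := by
  simp [pvPost]

theorem pvSplitFrom_ne_nil (cs : List Char) : ∀ cur d, pvSplitFrom cs cur d ≠ [] := by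
  induction cs with
  | nil => intro cur d; simp [pvSplitFrom]
  | cons c cs ih =>
    intro cur d
    simp only [pvSplitFrom]
    split_ifs <;> simp [ih]

theorem pvGetLastD_cons (a : List Char) (l : List (List Char)) (h : l ≠ []) :
    (a :: l).getLastD [] = l.getLastD [] := by
  cases l with
  | nil => simp at h
  | cons b t => simp [List.getLastD]

-- A's loop: columns built so far, the pending buffer, the depth
theorem pvA_fold (cs : List Char) : ∀ (cols : List (List Char)) (cur : List Char) (d : Int),
    cs.foldl pvAStep (cols, cur, d)
      = (cols ++ pvPost (pvSplitFrom cs cur d).dropLast,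
         (pvSplitFrom cs cur d).getLastD [], pvDepthAfter cs d) := by
  induction cs with
  | nil =>
    intro cols cur d
    simp [pvSplitFrom, pvPost, pvDepthAfter]
  | cons c cs ih =>
    intro cols cur d
    simp only [List.foldl_cons, pvAStep, pvSplitFrom, pvDepthAfter]
    by_cases h1 : c = '('
    · rw [if_pos h1, if_pos h1, if_pos h1, ih]
    by_cases h2 : c = ')'
    · rw [if_neg h1, if_neg h1, if_neg h1, if_pos h2, if_pos h2, if_pos h2, ih]
    by_cases h3 : c = ',' ∧ d = 0
    · rw [if_neg h1, if_neg h1, if_neg h1, if_neg h2, if_neg h2, if_neg h2,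
          if_pos h3, if_pos h3, ih]
      have hne := pvSplitFrom_ne_nil cs [] d
      rw [List.dropLast_cons_of_ne_nil hne, pvPost_cons, pvGetLastD_cons _ _ hne]
      split_ifs <;> simp
    · rw [if_neg h1, if_neg h1, if_neg h1, if_neg h2, if_neg h2, if_neg h2,
          if_neg h3, if_neg h3, ih]

-- closing A's loop: appending the stripped pending buffer completes pvPost
theorem pvA_finish (L : List (List Char)) (h : L ≠ []) :
    (if PySem.Chars.strip (L.getLastD []) ≠ [] then
        pvPost L.dropLast ++ [PySem.Chars.strip (L.getLastD [])]
      else pvPost L.dropLast) = pvPost L := by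
  conv_rhs => rw [← List.dropLast_append_getLast h]
  rw [pvPost_append]
  have hlast : L.getLastD [] = L.getLast h := by
    rw [List.getLastD_eq_getLast?, List.getLast?_eq_getLast_of_ne_nil h]; rfl
  rw [hlast]
  split_ifs with hs
  · rw [pvPost_cons, if_pos hs]
    simp [pvPost]
  · rw [pvPost_cons, if_neg hs]
    simp [pvPost]

-- B's first pass computes exactly the pvCutsFrom positions
theorem pvB_cuts (cs : List Char) : ∀ (acc : List Int) (i : Nat) (d : Int),
    (PySem.List.enumerate cs (i : Int)).foldl pvCutStep (acc, d)
      = (acc ++ (pvCutsFrom cs i d).map (Nat.cast : Nat → Int), pvDepthAfter cs d) := by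
  induction cs with
  | nil => intro acc i d; simp [PySem.List.enumerate, pvCutsFrom, pvDepthAfter]
  | cons c cs ih =>
    intro acc i d
    rw [PySem.List.enumerate_cons]
    have hcast : ((i : Int) + 1) = ((i + 1 : Nat) : Int) := by push_cast; ring
    simp only [List.foldl_cons, pvCutStep, pvCutsFrom, pvDepthAfter, hcast]
    by_cases h1 : c = '('
    · rw [if_pos h1, if_pos h1, if_pos h1, ih]
    by_cases h2 : c = ')'
    · rw [if_neg h1, if_neg h1, if_neg h1, if_pos h2, if_pos h2, if_pos h2, ih]
    by_cases h3 : c = ',' ∧ d = 0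
    · rw [if_neg h1, if_neg h1, if_neg h1, if_neg h2, if_neg h2, if_neg h2,
          if_pos h3, if_pos h3, ih]
      simp
    · rw [if_neg h1, if_neg h1, if_neg h1, if_neg h2, if_neg h2, if_neg h2,
          if_neg h3, if_neg h3, ih]

-- B's second pass: slicing at the cut positions yields the stripped, filtered
-- segments of pvSplitFrom; `s` is the current slice start, `cs = full.drop i`.
theorem pvB_slices (full : List Char) : ∀ (cs : List Char) (i s : Nat),
    full.drop i = cs → s ≤ i → i ≤ full.length →
    ∀ (d : Int) (cols : List (List Char)),
    (((pvCutsFrom cs i d).map (Nat.cast : Nat → Int) ++ [(full.length : Int)]).foldl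
        (pvSliceStep full) (cols, (s : Int))).1
      = cols ++ pvPost (pvSplitFrom cs ((full.drop s).take (i - s)) d) := by
  intro cs
  induction cs with
  | nil =>
    intro i s hdrop hs hi d cols
    have hlen : full.length ≤ i := by
      have := congrArg List.length hdrop
      simp [List.length_drop] at this
      omega
    have hieq : i = full.length := le_antisymm hi hlen
    subst hieq
    have htake : List.take (full.length - s) (List.drop s full) = List.drop s full := by
      apply List.take_of_length_le
      simp [List.length_drop]
    simp only [pvCutsFrom, pvSplitFrom]
    simp only [List.map_nil, List.nil_append, List.foldl_cons, List.foldl_nil, pvSliceStep]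
    rw [PySem.List.slice_natCast, htake, pvPost_cons]
    split_ifs <;> simp [pvPost]
  | cons c cs ih =>
    intro i s hdrop hs hi d cols
    have hilt : i < full.length := by
      by_contra h
      rw [List.drop_eq_nil_of_le (by omega)] at hdrop
      exact (List.cons_ne_nil c cs) hdrop.symm
    have hdrop1 : full.drop (i + 1) = cs := by
      rw [← List.tail_drop, hdrop]; rfl
    have hgetc : full[i]? = some c := by
      have : (full.drop i)[0]? = some c := by rw [hdrop]; rfl
      rwa [List.getElem?_drop, Nat.add_zero] at this
    have hext : ∀ t : Nat, t ≤ i → (full.drop t).take (i - t) ++ [c] = (full.drop t).take (i + 1 - t) := by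
      intro t ht
      have : i + 1 - t = (i - t) + 1 := by omega
      rw [this, List.take_add_one, List.getElem?_drop]
      have : t + (i - t) = i := by omega
      rw [this, hgetc]
      rfl
    simp only [pvCutsFrom, pvSplitFrom]
    by_cases h1 : c = '('
    · rw [if_pos h1, if_pos h1, ih (i+1) s hdrop1 (by omega) (by omega) (d+1) cols,
          ← hext s hs, h1]
    by_cases h2 : c = ')'
    · rw [if_neg h1, if_neg h1, if_pos h2, if_pos h2,
          ih (i+1) s hdrop1 (by omega) (by omega) (d-1) cols, ← hext s hs, h2]
    by_cases h3 : c = ',' ∧ d = 0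
    · rw [if_neg h1, if_neg h1, if_neg h2, if_neg h2, if_pos h3, if_pos h3]
      simp only [List.map_cons, List.cons_append, List.foldl_cons, pvSliceStep]
      rw [PySem.List.slice_natCast]
      have hcast : ((i : Int) + 1) = ((i + 1 : Nat) : Int) := by push_cast; ring
      rw [hcast, ih (i+1) (i+1) hdrop1 (by omega) (by omega) d _]
      have : (i + 1) - (i + 1) = 0 := by omega
      rw [this, List.take_zero, pvPost_cons]
      split_ifs <;> simp
    · rw [if_neg h1, if_neg h1, if_neg h2, if_neg h2, if_neg h3, if_neg h3,
          ih (i+1) s hdrop1 (by omega) (by omega) d cols, ← hext s hs]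

-- ===== VERDICT (by name: the statement is the Claim_ definition above) =====
theorem split_columns_py_spec : Claim_equal_split_columns_py := by
  intro s _
  unfold Spec_split_columns_py split_columns_py split_columns_py_alt
  simp only
  rw [show ((0 : Int)) = ((0 : Nat) : Int) by norm_num, pvB_cuts]
  have h := pvB_slices s.toList s.toList 0 0 (by simp) (by omega) (by omega) 0 []
  simp only [List.drop_zero, List.take_zero, Nat.sub_zero, List.nil_append, Nat.cast_zero] at h ⊢
  rw [h, pvA_fold, List.nil_append, pvA_finish _ (pvSplitFrom_ne_nil _ _ _)]
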